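-- pv_equiv track=rewrite | github.com/pavelalbaagent/ClawdioConfigs | scripts/profile_matrix.py | resolve_addon_profile_required_env
-- ===== SOURCE A (Python) =====
-- from typing import Any
--
-- def ensure_dict(value: Any) -> dict[str, Any]:
--     return value if isinstance(value, dict) else {}
--
-- def ensure_string_list(value: Any) -> list[str]:
--     if not isinstance(value, list):
--         return []
--     return [str(item) for item in value if isinstance(item, str) and item.strip()]
--
-- def resolve_addon_profile_required_env(
--     profile: dict[str, Any],
--     addons: dict[str, Any],
-- ) -> tuple[list[str], list[str], dict[str, list[str]]]:
--     addon_names = ensure_string_list(profile.get("enabled_addons"))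
--     required: list[str] = []
--     addon_required: dict[str, list[str]] = {}
--
--     for addon_name in addon_names:
--         addon = ensure_dict(addons.get(addon_name))
--         if not addon:
--             addon_required[addon_name] = []
--             continue
--         req = ensure_string_list(addon.get("required_env"))
--         req = list(dict.fromkeys(req))
--         addon_required[addon_name] = req
--         required.extend(req)
--
--     return addon_names, sorted(set(required)), addon_required
-- ===== SOURCE B (Python) =====
-- from typing import Any
--
-- def ensure_dict(value: Any) -> dict[str, Any]:
--     return value if isinstance(value, dict) else {}
--
-- def ensure_string_list(value: Any) -> list[str]:
--     if not isinstance(value, list):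
--         return []
--     return [str(item) for item in value if isinstance(item, str) and item.strip()]
--
-- def _clean_required(spec: Any) -> list[str]:
--     addon = ensure_dict(spec)
--     if not addon:
--         return []
--     reqs: list[str] = []
--     for item in ensure_string_list(addon.get("required_env")):
--         if item not in reqs:
--             reqs.append(item)
--     return reqs
--
-- def resolve_addon_profile_required_env(
--     profile: dict[str, Any],
--     addons: dict[str, Any],
-- ) -> tuple[list[str], list[str], dict[str, list[str]]]:
--     addon_names = ensure_string_list(profile.get("enabled_addons"))
--     enabled = set(addon_names)
--     # one pass over the addons mapping: index of cleaned required_env per enabled addon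
--     resolved = {name: _clean_required(spec) for name, spec in addons.items() if name in enabled}
--     addon_required = {name: resolved.get(name, []) for name in addon_names}
--     # aggregate by sort-then-adjacent-unique
--     pool = sorted(env for reqs in addon_required.values() for env in reqs)
--     required: list[str] = []
--     for env in pool:
--         if not required or required[-1] != env:
--             required.append(env)
--     return addon_names, required, addon_required
-- ===== Notes on version B (the rewrite author's own statement) =====
-- stated objective: alternative
-- what changed: B builds a resolved index in one pass over addons.items() restricted to the enabled-name set (no per-name lookup into addons), dedups each required_env by a membership-append loop instead of dict.fromkeys, and computes the aggregate by sorting the flattened pool and removing adjacent duplicates instead of sorted(set(...)); Pre_ excludes assoc-list encodings of addons with duplicate keys (unreachable from a Python dict), where A's first-match lookup and B's dict-comprehension last-match could differ.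
import Mathlib
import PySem

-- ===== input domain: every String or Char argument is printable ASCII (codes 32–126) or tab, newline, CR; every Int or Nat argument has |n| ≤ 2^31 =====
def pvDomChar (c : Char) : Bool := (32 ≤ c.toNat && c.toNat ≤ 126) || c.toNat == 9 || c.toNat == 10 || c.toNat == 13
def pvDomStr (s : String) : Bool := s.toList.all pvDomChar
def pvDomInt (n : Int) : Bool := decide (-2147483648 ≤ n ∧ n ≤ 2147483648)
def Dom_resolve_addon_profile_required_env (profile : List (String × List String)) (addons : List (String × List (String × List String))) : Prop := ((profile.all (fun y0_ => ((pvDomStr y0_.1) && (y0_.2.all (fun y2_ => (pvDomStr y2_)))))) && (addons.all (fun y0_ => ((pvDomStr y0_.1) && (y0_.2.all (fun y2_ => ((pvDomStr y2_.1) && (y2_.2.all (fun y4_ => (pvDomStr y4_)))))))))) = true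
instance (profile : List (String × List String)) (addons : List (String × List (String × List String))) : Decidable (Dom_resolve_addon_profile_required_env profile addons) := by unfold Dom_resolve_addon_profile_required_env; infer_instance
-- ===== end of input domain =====

-- B builds a resolved index in one pass over addons, dedups by membership-append, and aggregates by sort-then-adjacent-unique (alternative decomposition, same cost); Pre_ excludes duplicate addon keys in the assoc-list encoding (first-vs-last match corner unreachable from a Python dict).


-- ===== PORT A =====
-- ensure_string_list applied to the Option coming from dict.get: None → [];
-- str(item) is item (items are typed str), kept iff item.strip() is truthy.
def ensureStringList (v : Option (List String)) : List String :=
  match v with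
  | none => []
  | some xs => xs.filter (fun s => !(PySem.Str.strip s == ""))

def resolve_addon_profile_required_env (profile : List (String × List String)) (addons : List (String × List (String × List String))) : List String × List String × (List (String × List String)) :=
  let addon_names := ensureStringList (List.lookup "enabled_addons" profile)
  let st := addon_names.foldl
    (fun (st : List String × PySem.Dict String (List String)) addon_name =>
      let addon := (List.lookup addon_name addons).getD []   -- ensure_dict(addons.get(name)): None → {}
      if addon = [] then (st.1, st.2.insert addon_name [])   -- 'if not addon'
      else
        let req := PySem.List.dedup (ensureStringList (List.lookup "required_env" addon))  -- list(dict.fromkeys(...))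
        (st.1 ++ req, st.2.insert addon_name req))
    ([], PySem.Dict.empty)
  (addon_names, PySem.List.sorted (PySem.Set.ofList st.1) (fun x => x) false, st.2.items)

-- ===== PORT B =====
-- _clean_required: dedup of the cleaned required_env by a membership-append loop
def cleanRequired (spec : List (String × List String)) : List String :=
  if spec = [] then []
  else (ensureStringList (List.lookup "required_env" spec)).foldl
    (fun reqs item => if reqs.contains item then reqs else reqs ++ [item]) []

def resolve_addon_profile_required_env_alt (profile : List (String × List String)) (addons : List (String × List (String × List String))) : List String × List String × (List (String × List String)) :=
  let addon_names := ensureStringList (List.lookup "enabled_addons" profile)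
  let enabled := PySem.Set.ofList addon_names
  -- dict comprehension over addons.items() restricted to enabled names
  let resolved := (addons.filter (fun p => enabled.contains p.1)).foldl
    (fun (d : PySem.Dict String (List String)) p => d.insert p.1 (cleanRequired p.2)) PySem.Dict.empty
  let addon_required := addon_names.foldl
    (fun (d : PySem.Dict String (List String)) name => d.insert name (resolved.getD name [])) PySem.Dict.empty
  let pool := PySem.List.sorted (addon_required.values.flatMap (fun r => r)) (fun x => x) false
  -- adjacent-unique scan over the sorted pool
  let required := pool.foldl
    (fun (out : List String) env =>
      if out.isEmpty || !(PySem.List.pyGetD out (-1) "" == env) then out ++ [env] else out) []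
  (addon_names, required, addon_required.items)

-- ===== PRECONDITION & SPEC =====
-- Pre_ excludes assoc-list encodings of addons with DUPLICATE keys: a Python dict cannot contain them,
-- and A's first-match lookup vs B's dict-comprehension (last match wins) are both defensible there.
def Pre_resolve_addon_profile_required_env (profile : List (String × List String)) (addons : List (String × List (String × List String))) : Prop :=
  (addons.map Prod.fst).Nodup
instance (profile : List (String × List String)) (addons : List (String × List (String × List String))) : Decidable (Pre_resolve_addon_profile_required_env profile addons) := by unfold Pre_resolve_addon_profile_required_env; infer_instance

def pvWitness_resolve_addon_profile_required_env : (List (String × List String)) × (List (String × List (String × List String))) :=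
  ([("enabled_addons", ["x", "y"])], [("x", [("required_env", ["A", "B", "A"])]), ("z", [("required_env", ["C"])])])

def Spec_resolve_addon_profile_required_env (profile : List (String × List String)) (addons : List (String × List (String × List String))) (out : List String × List String × (List (String × List String))) : Prop := out = resolve_addon_profile_required_env_alt profile addons
instance (profile : List (String × List String)) (addons : List (String × List (String × List String))) (out : List String × List String × (List (String × List String))) : Decidable (Spec_resolve_addon_profile_required_env profile addons out) := by unfold Spec_resolve_addon_profile_required_env; infer_instance

-- ===== CLAIM (what is proved, stated in full; the proofs are below) =====
def Claim_equal_resolve_addon_profile_required_env : Prop := ∀ (profile : List (String × List String)) (addons : List (String × List (String × List String))), Dom_resolve_addon_profile_required_env profile addons → Pre_resolve_addon_profile_required_env profile addons → Spec_resolve_addon_profile_required_env profile addons (resolve_addon_profile_required_env profile addons)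

-- ===== LEMMAS AND PROOFS =====

-- A's per-name value (so that both programs can be compared pointwise)
def requiredEnvOf (addons : List (String × List (String × List String))) (n : String) : List String :=
  let addon := (List.lookup n addons).getD []
  if addon = [] then []
  else PySem.List.dedup (ensureStringList (List.lookup "required_env" addon))

lemma foldA_eq (addons : List (String × List (String × List String))) (names : List String) :
    ∀ (r : List String) (d : PySem.Dict String (List String)),
    names.foldl
      (fun (st : List String × PySem.Dict String (List String)) addon_name =>
        let addon := (List.lookup addon_name addons).getD []
        if addon = [] then (st.1, st.2.insert addon_name [])
        else
          let req := PySem.List.dedup (ensureStringList (List.lookup "required_env" addon))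
          (st.1 ++ req, st.2.insert addon_name req))
      (r, d)
    = (r ++ names.flatMap (requiredEnvOf addons),
       names.foldl (fun d name => d.insert name (requiredEnvOf addons name)) d) := by
  induction names with
  | nil => intro r d; simp
  | cons n ns ih =>
    intro r d
    rw [List.foldl_cons, List.foldl_cons, List.flatMap_cons]
    by_cases h : (List.lookup n addons).getD [] = []
    · have hn : requiredEnvOf addons n = [] := by
        show (if (List.lookup n addons).getD [] = [] then _ else _) = _
        rw [if_pos h]
      rw [hn, List.nil_append]
      show List.foldl _ (if (List.lookup n addons).getD [] = [] then _ else _) ns = _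
      rw [if_pos h]
      have hn2 : (fun (d : PySem.Dict String (List String)) name => d.insert name (requiredEnvOf addons name)) d n = d.insert n [] := by
        simp [hn]
      rw [← hn2]
      exact ih r _
    · have hn : requiredEnvOf addons n = PySem.List.dedup (ensureStringList (List.lookup "required_env" ((List.lookup n addons).getD []))) := by
        show (if (List.lookup n addons).getD [] = [] then _ else _) = _
        rw [if_neg h]
      rw [hn, ← List.append_assoc]
      show List.foldl _ (if (List.lookup n addons).getD [] = [] then _ else _) ns = _
      rw [if_neg h]
      rw [← hn]
      exact ih _ _

lemma lookup_eq_none_of_not_mem {β : Type} (k : String) (ps : List (String × β))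
    (h : k ∉ ps.map Prod.fst) : ps.lookup k = none := by
  induction ps with
  | nil => rfl
  | cons p ps ih =>
    simp only [List.map_cons, List.mem_cons, not_or] at h
    rw [List.lookup_cons]
    have hk : (k == p.1) = false := by simp [h.1]
    simp [hk, ih h.2]

-- getD of a fold-insert over an assoc list with nodup keys = first (= only) match
lemma getD_foldl_insert_pairs (f : String × List (String × List String) → List String)
    (ps : List (String × List (String × List String))) :
    ∀ (d : PySem.Dict String (List String)) (k : String), (ps.map Prod.fst).Nodup →
    (ps.foldl (fun d p => d.insert p.1 (f p)) d).getD k []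
      = match ps.lookup k with
        | some v => f (k, v)
        | none => d.getD k [] := by
  induction ps with
  | nil => intro d k _; rfl
  | cons p ps ih =>
    intro d k hnd
    simp only [List.map_cons, List.nodup_cons] at hnd
    rw [List.foldl_cons, ih _ k hnd.2, List.lookup_cons]
    by_cases hk : k = p.1
    · have hnone : ps.lookup k = none := lookup_eq_none_of_not_mem k ps (hk ▸ hnd.1)
      have hbeq : (k == p.1) = true := by simp [hk]
      simp only [hnone, hbeq]
      rw [hk]
      cases p
      simp [PySem.Dict.getD_insert_self]
    · have hbeq : (k == p.1) = false := by simp [hk]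
      simp only [hbeq]
      cases h : ps.lookup k
      · simp only []
        rw [PySem.Dict.getD_insert_of_ne]
        simp [hk]
      · rfl

-- lookup through a filter whose predicate holds at k
lemma lookup_filter_of_pred (q : String → Bool) (ps : List (String × List (String × List String)))
    (k : String) (hq : q k = true) :
    (ps.filter (fun p => q p.1)).lookup k = ps.lookup k := by
  induction ps with
  | nil => rfl
  | cons p ps ih =>
    by_cases hp : q p.1 = true
    · rw [show List.filter (fun p => q p.1) (p :: ps) = p :: List.filter (fun p => q p.1) ps from List.filter_cons_of_pos hp,
          List.lookup_cons, List.lookup_cons, ih]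
    · rw [show List.filter (fun p => q p.1) (p :: ps) = List.filter (fun p => q p.1) ps from List.filter_cons_of_neg hp, ih, List.lookup_cons]
      have : (k == p.1) = false := by
        by_contra hc
        simp only [Bool.not_eq_false, beq_iff_eq] at hc
        rw [hc] at hq; exact hp hq
      simp [this]

-- B's resolved.getD equals A's per-name value, for enabled names
lemma resolved_getD_eq (addons : List (String × List (String × List String)))
    (names : List String) (hnd : (addons.map Prod.fst).Nodup) (k : String) (hk : k ∈ names) :
    ((addons.filter (fun p => (PySem.Set.ofList names).contains p.1)).foldl
      (fun (d : PySem.Dict String (List String)) p => d.insert p.1 (cleanRequired p.2)) PySem.Dict.empty).getD k []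
      = requiredEnvOf addons k := by
  have hq : (PySem.Set.ofList names).contains k = true := by
    simp [PySem.Set.mem_ofList, hk]
  have hfnd : ((addons.filter (fun p => (PySem.Set.ofList names).contains p.1)).map Prod.fst).Nodup := by
    refine List.Nodup.sublist ?_ hnd
    exact List.Sublist.map Prod.fst (List.filter_sublist (l := addons))
  rw [getD_foldl_insert_pairs (fun p => cleanRequired p.2) _ _ _ hfnd,
      lookup_filter_of_pred _ addons k hq]
  cases h : addons.lookup k with
  | none =>
    show [] = requiredEnvOf addons k
    unfold requiredEnvOf
    simp [h]
  | some spec =>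
    show cleanRequired spec = requiredEnvOf addons k
    unfold requiredEnvOf cleanRequired
    simp only [h, Option.getD_some]
    by_cases hs : spec = []
    · simp [hs]
    · rw [if_neg hs, if_neg hs]
      rw [PySem.List.dedup_eq_ofList, PySem.Set.ofList_eq_foldl]
      rfl

lemma getD_foldl_insert_fn (f : String → List String) (names : List String) :
    ∀ (d : PySem.Dict String (List String)) (k : String),
    (names.foldl (fun d n => d.insert n (f n)) d).getD k []
      = if k ∈ names then f k else d.getD k [] := by
  induction names with
  | nil => intro d k; simp
  | cons n ns ih =>
    intro d k
    simp only [List.foldl_cons, ih, List.mem_cons]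
    by_cases hns : k ∈ ns
    · simp [hns]
    · by_cases hk : k = n
      · simp [hk, PySem.Dict.getD_insert_self]
      · simp [hns, hk, PySem.Dict.getD_insert_of_ne]

-- the two addon_required dicts are the same
lemma foldB_dict_eq (addons : List (String × List (String × List String)))
    (names : List String) (hnd : (addons.map Prod.fst).Nodup) :
    names.foldl
      (fun (d : PySem.Dict String (List String)) name =>
        d.insert name (((addons.filter (fun p => (PySem.Set.ofList names).contains p.1)).foldl
          (fun (d : PySem.Dict String (List String)) p => d.insert p.1 (cleanRequired p.2)) PySem.Dict.empty).getD name []))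
      PySem.Dict.empty
    = names.foldl (fun d name => d.insert name (requiredEnvOf addons name)) PySem.Dict.empty := by
  apply PySem.List.foldl_congr_mem
  intro d name hmem
  rw [resolved_getD_eq addons names hnd name hmem]

-- sorted(set(xs)) depends only on membership
lemma sorted_set_ext (xs ys : List String) (h : ∀ y, y ∈ xs ↔ y ∈ ys) :
    PySem.List.sorted (PySem.Set.ofList xs) (fun x => x) false
      = PySem.List.sorted (PySem.Set.ofList ys) (fun x => x) false := by
  apply PySem.List.sorted_eq_sorted_of_perm _ _ _ (fun a b hab => hab)
  refine (List.perm_ext_iff_of_nodup (PySem.Set.nodup_ofList xs) (PySem.Set.nodup_ofList ys)).mpr ?_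
  intro a
  simp [PySem.Set.mem_ofList, h a]

lemma mem_values_flatten (addons : List (String × List (String × List String))) (names : List String) (y : String) :
    y ∈ ((names.foldl (fun (d : PySem.Dict String (List String)) name => d.insert name (requiredEnvOf addons name)) PySem.Dict.empty).values.flatMap (fun r => r))
      ↔ y ∈ names.flatMap (requiredEnvOf addons) := by
  set D := names.foldl (fun (d : PySem.Dict String (List String)) name => d.insert name (requiredEnvOf addons name)) PySem.Dict.empty with hD
  have hkeys : D.keys = PySem.Set.ofList names := by
    rw [hD, PySem.Dict.keys_foldl_insert_key]
    simp [PySem.Dict.empty, PySem.Dict.keys, PySem.Set.update_nil_left]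
  have hnd : D.keys.Nodup := by
    rw [hkeys]; exact PySem.Set.nodup_ofList names
  have hvals : D.values = D.keys.map (fun k => D.getD k []) :=
    PySem.Dict.values_eq_map_keys D hnd []
  rw [hvals, hkeys]
  simp only [List.mem_flatMap, List.mem_map]
  constructor
  · rintro ⟨r, ⟨k, hk, rfl⟩, hy⟩
    have hkn : k ∈ names := (PySem.Set.mem_ofList _ _).mp hk
    refine ⟨k, hkn, ?_⟩
    rwa [hD, getD_foldl_insert_fn, if_pos hkn] at hy
  · rintro ⟨k, hk, hy⟩
    refine ⟨D.getD k [], ⟨k, (PySem.Set.mem_ofList _ _).mpr hk, rfl⟩, ?_⟩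
    rwa [hD, getD_foldl_insert_fn, if_pos hk]

-- one adjacent-unique step on a ≤-sorted accumulator bounded by env is set insertion
lemma step_eq_add (acc : List String) (env : String) (hacc : acc.Pairwise (· ≤ ·))
    (hub : ∀ a ∈ acc, a ≤ env) :
    (if acc.isEmpty || !(PySem.List.pyGetD acc (-1) "" == env) then acc ++ [env] else acc)
      = PySem.Set.add acc env := by
  induction acc using List.reverseRecOn with
  | nil => simp [PySem.Set.add]
  | append_singleton ys y _ =>
    rw [PySem.List.pyGetD_neg_one_append_singleton]
    have hysy : ∀ a ∈ ys, a ≤ y := by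
      intro a ha
      have := (List.pairwise_append.mp hacc).2.2
      simpa using this a ha
    by_cases hy : y = env
    · subst hy
      have hmem : y ∈ ys ++ [y] := by simp
      simp [PySem.Set.add, PySem.Set.contains, hmem]
    · have hnm : env ∉ ys ++ [y] := by
        intro hmem
        rcases List.mem_append.mp hmem with h | h
        · have h1 : env ≤ y := hysy env h
          have h2 : y ≤ env := hub y (by simp)
          exact hy (le_antisymm h2 h1)
        · simp at h; exact hy h.symm
      have hbeq : (y == env) = false := by simp [hy]
      simp [PySem.Set.add, PySem.Set.contains, hnm, hbeq]

-- the adjacent-unique scan over a ≤-sorted pool is the fold of set insertion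
lemma adj_fold_eq_add (pool : List String) :
    ∀ (acc : List String), pool.Pairwise (· ≤ ·) → acc.Pairwise (· ≤ ·) →
    (∀ a ∈ acc, ∀ b ∈ pool, a ≤ b) →
    pool.foldl (fun (out : List String) env =>
      if out.isEmpty || !(PySem.List.pyGetD out (-1) "" == env) then out ++ [env] else out) acc
    = pool.foldl PySem.Set.add acc := by
  induction pool with
  | nil => intros; rfl
  | cons env rest ih =>
    intro acc hp hacc hinv
    obtain ⟨hhead, hrest⟩ := List.pairwise_cons.mp hp
    have hub : ∀ a ∈ acc, a ≤ env := fun a ha => hinv a ha env (List.mem_cons_self)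
    rw [List.foldl_cons, List.foldl_cons, step_eq_add acc env hacc hub]
    by_cases hc : env ∈ acc
    · have hadd : PySem.Set.add acc env = acc := by
        simp [PySem.Set.add, PySem.Set.contains, hc]
      rw [hadd]
      exact ih acc hrest hacc (fun a ha b hb => hinv a ha b (List.mem_cons_of_mem _ hb))
    · have hadd : PySem.Set.add acc env = acc ++ [env] := by
        simp [PySem.Set.add, PySem.Set.contains, hc]
      rw [hadd]
      apply ih _ hrest
      · exact List.pairwise_append.mpr ⟨hacc, by simp, by simpa using hub⟩
      · intro a ha b hb
        rcases List.mem_append.mp ha with h | h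
        · exact hinv a h b (List.mem_cons_of_mem _ hb)
        · simp at h; subst h; exact hhead b hb

-- the adjacent-unique scan over a ≤-sorted list is exactly set(pool) in order
lemma adj_unique_eq_ofList (pool : List String) (hp : pool.Pairwise (· ≤ ·)) :
    pool.foldl (fun (out : List String) env =>
      if out.isEmpty || !(PySem.List.pyGetD out (-1) "" == env) then out ++ [env] else out) []
    = PySem.Set.ofList pool := by
  rw [adj_fold_eq_add pool [] hp (by simp) (by simp), ← PySem.Set.ofList_eq_foldl]

lemma ofList_sublist (xs : List String) : (PySem.Set.ofList xs).Sublist xs := by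
  induction xs with
  | nil => simp [PySem.Set.ofList_nil]
  | cons x xs ih =>
    rw [PySem.Set.ofList_cons]
    exact List.Sublist.cons₂ x (List.Sublist.trans (by simp [PySem.Set.discard]) ih)

-- sorted(set(xs)) = set(sorted(xs))
lemma sorted_ofList_comm (xs : List String) :
    PySem.List.sorted (PySem.Set.ofList xs) (fun x => x) false
      = PySem.Set.ofList (PySem.List.sorted xs (fun x => x) false) := by
  apply PySem.List.sorted_eq_of_perm_of_pairwise_lt
  · refine (List.perm_ext_iff_of_nodup (PySem.Set.nodup_ofList _) (PySem.Set.nodup_ofList _)).mpr ?_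
    intro a
    simp [PySem.Set.mem_ofList, PySem.List.mem_sorted]
  · have hle : (PySem.Set.ofList (PySem.List.sorted xs (fun x => x) false)).Pairwise (· ≤ ·) :=
      List.Pairwise.sublist (ofList_sublist _) (PySem.List.sorted_pairwise xs (fun x => x))
    have hnd : (PySem.Set.ofList (PySem.List.sorted xs (fun x => x) false)).Pairwise (· ≠ ·) :=
      PySem.Set.nodup_ofList _
    exact (hle.and hnd).imp (fun h => lt_of_le_of_ne h.1 h.2)

-- ===== VERDICT (by name: the statement is the Claim_ definition above) =====
theorem resolve_addon_profile_required_env_spec : Claim_equal_resolve_addon_profile_required_env := by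
  intro profile addons _ hnd
  unfold Spec_resolve_addon_profile_required_env
  unfold resolve_addon_profile_required_env resolve_addon_profile_required_env_alt
  simp only [foldA_eq, List.nil_append, foldB_dict_eq addons _ hnd, Prod.mk.injEq]
  refine ⟨trivial, ?_, trivial⟩
  rw [adj_unique_eq_ofList _ (PySem.List.sorted_pairwise _ _), ← sorted_ofList_comm]
  exact sorted_set_ext _ _ (fun y => (mem_values_flatten addons (ensureStringList (List.lookup "enabled_addons" profile)) y).symm)
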